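-- pv_equiv track=rewrite | github.com/DoubleBlindCogSci/autoos-evaluation | autoos/text_processing_sweet_pea.py | get_factors_from_code_as_list
-- ===== SOURCE A (Python) =====
-- def get_factors_from_code_as_list(code: str) -> list:
--     """
--     Args:
--         code:
--     Returns:
--     """
--     lines = code.splitlines(False)
--     objects = []
--     for line in lines:
--         words = line.split(' ')
--         if len(words) >= 3 and words[2].startswith('Factor'):
--             variable_name = words[0]
--             factor_name = ''
--             read = False
--             for char in words[2]:
--                 if read and not (char == '"' or char == "'"):
--                     factor_name += char
--                 if read and (char == '"' or char == "'"):
--                     break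
--                 if char == '"' or char == "'":
--                     read = True
--             objects.append((variable_name, factor_name))
--     return objects
-- ===== SOURCE B (Python) =====
-- def _first_quote(w):
--     i = w.find('"')
--     j = w.find("'")
--     if i < 0:
--         return j
--     if j < 0:
--         return i
--     return min(i, j)
--
--
-- def _factor_name(w):
--     i = _first_quote(w)
--     if i < 0:
--         return ''
--     rest = w[i + 1:]
--     j = _first_quote(rest)
--     return rest if j < 0 else rest[:j]
--
--
-- def get_factors_from_code_as_list(code):
--     rows = [line.split(' ') for line in code.splitlines(False)]
--     return [(words[0], _factor_name(words[2]))
--             for words in rows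
--             if len(words) >= 3 and words[2].startswith('Factor')]
-- ===== Notes on version B (the rewrite author's own statement) =====
-- stated objective: simpler
-- what changed: The per-character read/break state machine that accumulates the factor name is replaced by locating the first quote character (smallest non-negative of the two str.find results) and slicing up to the next quote, and the append loop is replaced by a filter/map comprehension over the split lines.
import Mathlib
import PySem

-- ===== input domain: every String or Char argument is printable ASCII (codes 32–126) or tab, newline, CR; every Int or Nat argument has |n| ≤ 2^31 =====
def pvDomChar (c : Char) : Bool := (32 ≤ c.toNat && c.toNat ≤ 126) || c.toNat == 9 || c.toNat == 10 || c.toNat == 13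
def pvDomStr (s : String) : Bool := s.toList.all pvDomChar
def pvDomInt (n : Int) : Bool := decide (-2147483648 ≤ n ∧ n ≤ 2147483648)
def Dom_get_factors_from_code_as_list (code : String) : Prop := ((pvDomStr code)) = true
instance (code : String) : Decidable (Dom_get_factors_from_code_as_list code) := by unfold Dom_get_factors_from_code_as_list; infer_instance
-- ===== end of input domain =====

-- B replaces A's per-character read/break state machine by find-the-first-quote +
-- slice-to-the-next-quote, and the append loop by a filter/map comprehension (objective: simpler).

-- ===== PORT A =====
-- inner character loop of A: state (factor_name, read), break on a quote while reading
def pvScanA : List Char → String → Bool → String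
  | [], acc, _ => acc
  | c :: cs, acc, read =>
    if read && !(c == '"' || c == '\'') then pvScanA cs (acc.push c) read
    else if read && (c == '"' || c == '\'') then acc
    else if c == '"' || c == '\'' then pvScanA cs acc true
    else pvScanA cs acc read

def get_factors_from_code_as_list (code : String) : List (String × String) :=
  (PySem.Str.splitlines code).foldl (fun objects line =>
    let words := (PySem.Str.split? line " ").getD []
    if decide (3 ≤ words.length) && PySem.Str.startswith (words.getD 2 "") "Factor" then
      objects ++ [(words.getD 0 "", pvScanA (words.getD 2 "").toList "" false)]
    else objects) []

-- ===== PORT B =====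
-- Source B: _first_quote = smallest non-negative of find('"') and find("'"), -1 if neither occurs
def pvFirstQuote (w : String) : Int :=
  let i := PySem.Str.find w "\""
  let j := PySem.Str.find w "'"
  if i < 0 then j else if j < 0 then i else min i j

-- Source B: _factor_name = slice after the first quote, up to the next quote (or the end)
def pvFactorName (w : String) : String :=
  let i := pvFirstQuote w
  if i < 0 then ""
  else
    let rest := PySem.Str.slice w (some (i + 1)) none
    let j := pvFirstQuote rest
    if j < 0 then rest else PySem.Str.slice rest none (some j)

def get_factors_from_code_as_list_alt (code : String) : List (String × String) :=
  let rows := (PySem.Str.splitlines code).map (fun line => (PySem.Str.split? line " ").getD [])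
  (rows.filter (fun words =>
      decide (3 ≤ words.length) && PySem.Str.startswith (words.getD 2 "") "Factor")).map
    (fun words => (words.getD 0 "", pvFactorName (words.getD 2 "")))

-- ===== PRECONDITION & SPEC =====
def Spec_get_factors_from_code_as_list (code : String) (out : List (String × String)) : Prop := out = get_factors_from_code_as_list_alt code
instance (code : String) (out : List (String × String)) : Decidable (Spec_get_factors_from_code_as_list code out) := by unfold Spec_get_factors_from_code_as_list; infer_instance

-- ===== CLAIM (what is proved, stated in full; the proofs are below) =====
def Claim_equal_get_factors_from_code_as_list : Prop := ∀ (code : String), Dom_get_factors_from_code_as_list code → Spec_get_factors_from_code_as_list code (get_factors_from_code_as_list code)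

-- ===== LEMMAS AND PROOFS =====

-- the quote test, and the index of the first quote as a structural recursion
def pvIsQ (c : Char) : Bool := c == '"' || c == '\''

def pvQpos : List Char → Int
  | [] => -1
  | c :: cs => if pvIsQ c then 0 else (if pvQpos cs < 0 then -1 else pvQpos cs + 1)

theorem pvScanA_true (cs : List Char) (acc : String) :
    pvScanA cs acc true = String.ofList (acc.toList ++ cs.takeWhile (fun c => !pvIsQ c)) := by
  induction cs generalizing acc with
  | nil => simp [pvScanA]
  | cons c cs ih =>
    by_cases h : (c == '"' || c == '\'') = true
    · have hq : (!pvIsQ c) = false := by simp [pvIsQ, h]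
      simp [pvScanA, h, List.takeWhile_cons, hq]
    · have hq : (!pvIsQ c) = true := by simp [pvIsQ]; simpa using h
      simp [pvScanA, h, List.takeWhile_cons, hq, ih]

theorem pvScanA_false (cs : List Char) (acc : String) :
    pvScanA cs acc false = pvScanA ((cs.dropWhile (fun c => !pvIsQ c)).tail) acc true := by
  induction cs with
  | nil => simp [pvScanA]
  | cons c cs ih =>
    by_cases h : (c == '"' || c == '\'') = true
    · have hq : (!pvIsQ c) = false := by simp [pvIsQ, h]
      simp [pvScanA, h, List.dropWhile_cons, hq]
    · have hq : (!pvIsQ c) = true := by simp [pvIsQ]; simpa using h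
      simp [pvScanA, h, List.dropWhile_cons, hq, ih]

theorem pvFind_go_ge (sub : List Char) (cs : List Char) (k : Nat) :
    PySem.Chars.find.go sub cs k = -1 ∨ (k : Int) ≤ PySem.Chars.find.go sub cs k := by
  induction cs generalizing k with
  | nil => by_cases h : sub.isEmpty <;> simp [PySem.Chars.find.go, h]
  | cons c cs ih =>
    by_cases h : sub.isPrefixOf (c :: cs) = true
    · simp [PySem.Chars.find.go, h]
    · rcases ih (k + 1) with h1 | h1
      · left; simpa [PySem.Chars.find.go, h] using h1
      · right
        simp only [PySem.Chars.find.go, h, if_false, Bool.false_eq_true]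
        calc (k : Int) ≤ ((k + 1 : Nat) : Int) := by push_cast; omega
          _ ≤ _ := h1

theorem pvQpos_lt (cs : List Char) (h : pvQpos cs < 0) : pvQpos cs = -1 := by
  induction cs with
  | nil => simp [pvQpos]
  | cons c cs ih =>
    by_cases hq : pvIsQ c = true
    · simp [pvQpos, hq] at h
    · by_cases h2 : pvQpos cs < 0 <;> simp [pvQpos, hq, h2] at h ⊢; omega

theorem pvFirstQuote_go (cs : List Char) (k : Nat) :
    (if PySem.Chars.find.go ['"'] cs k < 0 then PySem.Chars.find.go ['\''] cs k
     else if PySem.Chars.find.go ['\''] cs k < 0 then PySem.Chars.find.go ['"'] cs k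
     else min (PySem.Chars.find.go ['"'] cs k) (PySem.Chars.find.go ['\''] cs k)) =
    (if pvQpos cs < 0 then -1 else pvQpos cs + k) := by
  induction cs generalizing k with
  | nil => simp [PySem.Chars.find.go, pvQpos]
  | cons c cs ih =>
    by_cases h1 : c = '"'
    · have hp1 : List.isPrefixOf ['"'] (c :: cs) = true := by simp [h1, List.isPrefixOf]
      have hp2 : List.isPrefixOf ['\''] (c :: cs) = true ↔ False := by
        simp [h1, List.isPrefixOf]
      have hq : pvIsQ c = true := by simp [pvIsQ, h1]
      rcases pvFind_go_ge ['\''] cs (k + 1) with hj | hj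
      · simp [PySem.Chars.find.go, hp1, hp2, pvQpos, hq, hj]
      · have hj0 : ¬ PySem.Chars.find.go ['\''] cs (k + 1) < 0 := by
          push_cast at hj; omega
        have hm : min ((k : Int)) (PySem.Chars.find.go ['\''] cs (k + 1)) = k := by
          push_cast at hj; omega
        simp [PySem.Chars.find.go, hp1, hp2, pvQpos, hq, hj0, hm]
    · by_cases h2 : c = '\''
      · have hp1 : List.isPrefixOf ['"'] (c :: cs) = true ↔ False := by
          simp [h2, List.isPrefixOf]
        have hp2 : List.isPrefixOf ['\''] (c :: cs) = true := by simp [h2, List.isPrefixOf]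
        have hq : pvIsQ c = true := by simp [pvIsQ, h2]
        rcases pvFind_go_ge ['"'] cs (k + 1) with hi | hi
        · simp [PySem.Chars.find.go, hp1, hp2, pvQpos, hq, hi]
        · have hi0 : ¬ PySem.Chars.find.go ['"'] cs (k + 1) < 0 := by
            push_cast at hi; omega
          have hm : min (PySem.Chars.find.go ['"'] cs (k + 1)) ((k : Int)) = k := by
            push_cast at hi; omega
          simp [PySem.Chars.find.go, hp1, hp2, pvQpos, hq, hi0, hm]
      · have hp1 : List.isPrefixOf ['"'] (c :: cs) = true ↔ False := by
          simp [List.isPrefixOf]; exact fun h => absurd h.symm h1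
        have hp2 : List.isPrefixOf ['\''] (c :: cs) = true ↔ False := by
          simp [List.isPrefixOf]; exact fun h => absurd h.symm h2
        have hq : pvIsQ c = false := by simp [pvIsQ, h1, h2]
        have := ih (k + 1)
        by_cases h3 : pvQpos cs < 0
        · simp [PySem.Chars.find.go, hp1, hp2, pvQpos, hq, h3] at this ⊢; exact this
        · simp [PySem.Chars.find.go, hp1, hp2, pvQpos, hq, h3] at this ⊢
          push_cast at this ⊢; omega

theorem pvFirstQuote_eq (w : String) : pvFirstQuote w = pvQpos w.toList := by
  have h0 : ("\"" : String).toList = ['"'] := by decide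
  have h1 : ("'" : String).toList = ['\''] := by decide
  have := pvFirstQuote_go w.toList 0
  simp only [pvFirstQuote, PySem.Str.find_eq, PySem.Chars.find, h0, h1]
  rw [this]
  by_cases h : pvQpos w.toList < 0
  · simp [h, pvQpos_lt _ h]
  · simp [h]

theorem pvQpos_neg (cs : List Char) (h : pvQpos cs < 0) :
    cs.dropWhile (fun c => !pvIsQ c) = [] := by
  induction cs with
  | nil => simp
  | cons c cs ih =>
    by_cases hq : pvIsQ c = true
    · simp [pvQpos, hq] at h
    · by_cases h2 : pvQpos cs < 0
      · simp [List.dropWhile_cons, hq, ih h2]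
      · simp [pvQpos, hq, h2] at h; omega

theorem pvQpos_nonneg (cs : List Char) (h : 0 ≤ pvQpos cs) :
    (pvQpos cs).toNat = (cs.takeWhile (fun c => !pvIsQ c)).length := by
  induction cs with
  | nil => simp [pvQpos] at h
  | cons c cs ih =>
    by_cases hq : pvIsQ c = true
    · simp [pvQpos, hq, List.takeWhile_cons]
    · by_cases h2 : pvQpos cs < 0
      · simp [pvQpos, hq, h2] at h
      · have h3 : 0 ≤ pvQpos cs := by omega
        simp [pvQpos, hq, h2, List.takeWhile_cons, ih h3]
        omega

theorem pvDropLen (p : Char → Bool) (l : List Char) :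
    l.drop ((l.takeWhile p).length + 1) = (l.dropWhile p).tail := by
  induction l with
  | nil => simp
  | cons c l ih =>
    by_cases h : p c <;> simp [List.takeWhile_cons, List.dropWhile_cons, h, ih]

theorem pvTakeLen (p : Char → Bool) (l : List Char) :
    l.take ((l.takeWhile p).length) = l.takeWhile p := by
  induction l with
  | nil => simp
  | cons c l ih => by_cases h : p c <;> simp [List.takeWhile_cons, h, ih]

theorem pvTakeAll (l : List Char) (h : pvQpos l < 0) :
    l.takeWhile (fun c => !pvIsQ c) = l := by
  have hd := pvQpos_neg l h
  conv_rhs => rw [← List.takeWhile_append_dropWhile (p := fun c => !pvIsQ c) (l := l)]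
  rw [hd]
  simp

theorem pvInner_eq (w : String) : pvScanA w.toList "" false = pvFactorName w := by
  rw [pvScanA_false]
  simp only [pvFactorName, pvFirstQuote_eq]
  by_cases h : pvQpos w.toList < 0
  · rw [pvQpos_neg _ h]
    simp [h, pvScanA]
  · have h0 : 0 ≤ pvQpos w.toList := by omega
    have hn := pvQpos_nonneg _ h0
    have hrest : PySem.List.slice w.toList (some (pvQpos w.toList + 1)) none =
        (w.toList.dropWhile (fun c => !pvIsQ c)).tail := by
      rw [PySem.List.slice_from _ (by omega)]
      have ht : (pvQpos w.toList + 1).toNat = (pvQpos w.toList).toNat + 1 := by omega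
      rw [ht, hn, pvDropLen]
    simp only [h, if_false]
    apply String.toList_inj.mp
    rw [apply_ite String.toList]
    simp only [PySem.Str.toList_slice, PySem.Chars.slice_eq_listSlice]
    rw [hrest]
    by_cases hj : pvQpos ((w.toList.dropWhile (fun c => !pvIsQ c)).tail) < 0
    · rw [if_pos hj, pvScanA_true, pvTakeAll _ hj]
      simp
    · have hj0 : 0 ≤ pvQpos ((w.toList.dropWhile (fun c => !pvIsQ c)).tail) := by omega
      rw [if_neg hj, pvScanA_true, PySem.List.slice_to _ (by omega),
        pvQpos_nonneg _ hj0, pvTakeLen]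
      simp

theorem pvOuter (lines : List String) (acc : List (String × String)) :
    lines.foldl (fun objects line =>
      let words := (PySem.Str.split? line " ").getD []
      if decide (3 ≤ words.length) && PySem.Str.startswith (words.getD 2 "") "Factor" then
        objects ++ [(words.getD 0 "", pvScanA (words.getD 2 "").toList "" false)]
      else objects) acc =
    acc ++ ((lines.map (fun line => (PySem.Str.split? line " ").getD [])).filter (fun words =>
      decide (3 ≤ words.length) && PySem.Str.startswith (words.getD 2 "") "Factor")).map
      (fun words => (words.getD 0 "", pvFactorName (words.getD 2 ""))) := by
  induction lines generalizing acc with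
  | nil => simp
  | cons line lines ih =>
    simp only [List.foldl_cons, List.map_cons, List.filter_cons]
    by_cases h : (decide (3 ≤ ((PySem.Str.split? line " ").getD []).length) &&
        PySem.Str.startswith (((PySem.Str.split? line " ").getD []).getD 2 "") "Factor") = true
    · rw [if_pos h, if_pos h, pvInner_eq, ih]
      simp
    · rw [if_neg h, if_neg h, ih]

-- ===== VERDICT (by name: the statement is the Claim_ definition above) =====
theorem get_factors_from_code_as_list_spec : Claim_equal_get_factors_from_code_as_list := by
  intro code _
  unfold Spec_get_factors_from_code_as_list get_factors_from_code_as_list get_factors_from_code_as_list_alt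
  simpa using pvOuter (PySem.Str.splitlines code) []
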